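-- pv_equiv track=rewrite | github.com/wnstlr/document-matching | scripts/compute_explanation.py | break_down_hyphens
-- ===== SOURCE A (Python) =====
-- def break_down_hyphens(lst):
--     out = []
--     for i, w in enumerate(lst):
--         if '-' in w and '--' not in w:
--             ss = w.split('-')
--             for s in ss[:-1]:
--                 out.append(s)
--                 out.append('-')
--             out.append(ss[-1])
--         else:
--             out.append(w)
--     return out
-- ===== SOURCE B (Python) =====
-- def break_down_hyphens(lst):
--     # single pass over each word's characters instead of split-then-interleave
--     out = []
--     for w in lst:
--         if '-' in w and '--' not in w:
--             cur = []
--             for c in w: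
--                 if c == '-':
--                     out.append(''.join(cur))
--                     out.append('-')
--                     cur = []
--                 else:
--                     cur.append(c)
--             out.append(''.join(cur))
--         else:
--             out.append(w)
--     return out
-- ===== Notes on version B (the rewrite author's own statement) =====
-- stated objective: alternative
-- what changed: Replaces split('-') followed by an interleaving loop over the pieces with a single character-level scan per word that emits each accumulated piece and a '-' marker as it meets each hyphen.
import Mathlib
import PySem

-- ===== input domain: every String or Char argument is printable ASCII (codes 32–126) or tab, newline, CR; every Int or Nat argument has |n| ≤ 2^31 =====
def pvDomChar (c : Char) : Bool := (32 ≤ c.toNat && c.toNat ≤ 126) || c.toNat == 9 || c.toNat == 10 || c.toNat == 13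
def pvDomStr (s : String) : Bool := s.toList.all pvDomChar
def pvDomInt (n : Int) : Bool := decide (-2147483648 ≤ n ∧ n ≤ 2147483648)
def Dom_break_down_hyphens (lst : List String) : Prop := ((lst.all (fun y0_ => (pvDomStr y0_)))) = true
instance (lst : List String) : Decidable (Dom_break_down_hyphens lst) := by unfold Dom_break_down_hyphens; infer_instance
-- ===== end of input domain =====

-- B replaces A's split('-')-then-interleave inner loop by a single character scan per word
-- that emits each accumulated piece and a '-' marker on meeting a hyphen (objective: alternative).

-- ===== PORT A =====
-- w.split('-') with the nonempty literal separator '-' is PySem.Chars.splitOn on the code points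
def break_down_hyphens (lst : List String) : List String :=
  lst.foldl
    (fun out w =>
      if PySem.Str.isIn "-" w && !(PySem.Str.isIn "--" w) then
        let ss := PySem.Chars.splitOn w.toList ['-']
        let out := (PySem.List.slice ss none (some (-1))).foldl
          (fun out s => out ++ [String.ofList s] ++ ["-"]) out
        -- ss[-1]: splitOn never returns [], so pyGet? is some; .getD [] is never taken
        out ++ [String.ofList ((PySem.List.pyGet? ss (-1)).getD [])]
      else out ++ [w]) []

-- ===== PORT B =====
def break_down_hyphens_alt (lst : List String) : List String :=
  lst.foldl
    (fun out w =>
      if PySem.Str.isIn "-" w && !(PySem.Str.isIn "--" w) then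
        let p := w.toList.foldl
          (fun (p : List String × List Char) c =>
            if c = '-' then (p.1 ++ [String.ofList p.2] ++ ["-"], [])
            else (p.1, p.2 ++ [c])) (out, [])
        p.1 ++ [String.ofList p.2]
      else out ++ [w]) []

-- ===== PRECONDITION & SPEC =====
def Spec_break_down_hyphens (lst : List String) (out : List String) : Prop := out = break_down_hyphens_alt lst
instance (lst : List String) (out : List String) : Decidable (Spec_break_down_hyphens lst out) := by unfold Spec_break_down_hyphens; infer_instance

-- ===== CLAIM (what is proved, stated in full; the proofs are below) =====
def Claim_equal_break_down_hyphens : Prop := ∀ (lst : List String), Dom_break_down_hyphens lst → Spec_break_down_hyphens lst (break_down_hyphens lst)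

-- ===== LEMMAS AND PROOFS =====

-- reference splitter: pieces of cs cut at '-', the first piece continuing pre
def pvSplit (pre : List Char) : List Char → List (List Char)
  | [] => [pre]
  | c :: cs => if c = '-' then pre :: pvSplit [] cs else pvSplit (pre ++ [c]) cs

theorem pvSplit_ne_nil (pre : List Char) (cs : List Char) : pvSplit pre cs ≠ [] := by
  induction cs generalizing pre with
  | nil => simp [pvSplit]
  | cons c cs ih => by_cases h : c = '-' <;> simp [pvSplit, h, ih]

theorem splitOn_go_eq (fuel : Nat) (l cur : List Char) (acc : List (List Char))
    (h : l.length < fuel) :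
    PySem.Chars.splitOn.go ['-'] fuel l cur acc = acc.reverse ++ pvSplit cur.reverse l := by
  induction fuel generalizing l cur acc with
  | zero => omega
  | succ fuel ih =>
    cases l with
    | nil => simp [PySem.Chars.splitOn.go, pvSplit]
    | cons c rest =>
      by_cases hc : c = '-'
      · subst hc
        have : (['-'].isPrefixOf ('-' :: rest)) = true := by simp [List.isPrefixOf]
        simp only [PySem.Chars.splitOn.go, this, if_pos]
        rw [ih _ _ _ (by simpa using Nat.lt_of_succ_lt_succ h)]
        simp [pvSplit]
      · have : (['-'].isPrefixOf (c :: rest)) = false := by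
          simp [List.isPrefixOf]; exact Ne.symm hc
        simp only [PySem.Chars.splitOn.go, this, Bool.false_eq_true, if_false]
        rw [ih _ _ _ (by simpa using Nat.lt_of_succ_lt_succ h)]
        simp [pvSplit, hc]

theorem splitOn_eq_pvSplit (cs : List Char) :
    PySem.Chars.splitOn cs ['-'] = pvSplit [] cs := by
  unfold PySem.Chars.splitOn
  rw [splitOn_go_eq _ _ _ _ (by omega)]
  simp

-- the interleaving of pieces with '-' markers that A's inner loop produces
def pvInter : List (List Char) → List String
  | [] => []
  | [p] => [String.ofList p]
  | p :: q :: ps => String.ofList p :: "-" :: pvInter (q :: ps)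

theorem a_inner_eq (ss : List (List Char)) (hne : ss ≠ []) (out : List String) :
    (PySem.List.slice ss none (some (-1))).foldl
        (fun out s => out ++ [String.ofList s] ++ ["-"]) out
      ++ [String.ofList ((PySem.List.pyGet? ss (-1)).getD [])]
    = out ++ pvInter ss := by
  have hslice : ∀ (xs : List (List Char)), PySem.List.slice xs none (some (-1)) = xs.dropLast := by
    intro xs; simp [PySem.List.slice, List.dropLast_eq_take]
  rw [hslice]
  induction ss generalizing out with
  | nil => exact absurd rfl hne
  | cons p ps ih =>
    cases ps with
    | nil => simp [pvInter, PySem.List.pyGet?, PySem.List.pyIdx?]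
    | cons q ps' =>
      have h1 : PySem.List.pyGet? (p :: q :: ps') (-1) = PySem.List.pyGet? (q :: ps') (-1) := by
        rw [PySem.List.pyGet?_neg _ (by omega) (by simp),
            PySem.List.pyGet?_neg _ (by omega) (by simp)]
        simp [List.length_cons]
        rfl
      rw [List.dropLast_cons_of_ne_nil (by simp), List.foldl_cons, h1]
      rw [ih (by simp) (out ++ [String.ofList p] ++ ["-"])]
      simp [pvInter]

theorem b_inner_eq (cs : List Char) (out : List String) (cur : List Char) :
    (cs.foldl
        (fun (p : List String × List Char) c =>
          if c = '-' then (p.1 ++ [String.ofList p.2] ++ ["-"], [])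
          else (p.1, p.2 ++ [c])) (out, cur)).1
      ++ [String.ofList ((cs.foldl
        (fun (p : List String × List Char) c =>
          if c = '-' then (p.1 ++ [String.ofList p.2] ++ ["-"], [])
          else (p.1, p.2 ++ [c])) (out, cur)).2)]
    = out ++ pvInter (pvSplit cur cs) := by
  induction cs generalizing out cur with
  | nil => simp [pvSplit, pvInter]
  | cons c cs ih =>
    by_cases hc : c = '-'
    · subst hc
      rw [List.foldl_cons]
      rw [if_pos rfl]
      rw [ih]
      have : pvInter (cur :: pvSplit [] cs) = String.ofList cur :: "-" :: pvInter (pvSplit [] cs) := by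
        cases h : pvSplit [] cs with
        | nil => exact absurd h (pvSplit_ne_nil [] cs)
        | cons q ps => simp [pvInter]
      simp [pvSplit, this]
    · rw [List.foldl_cons]
      simp only [if_neg hc]
      rw [ih]
      simp [pvSplit, hc]

theorem step_eq (out : List String) (w : String) :
    (if PySem.Str.isIn "-" w && !(PySem.Str.isIn "--" w) then
        let ss := PySem.Chars.splitOn w.toList ['-']
        let out' := (PySem.List.slice ss none (some (-1))).foldl
          (fun out s => out ++ [String.ofList s] ++ ["-"]) out
        out' ++ [String.ofList ((PySem.List.pyGet? ss (-1)).getD [])]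
      else out ++ [w])
    = (if PySem.Str.isIn "-" w && !(PySem.Str.isIn "--" w) then
        let p := w.toList.foldl
          (fun (p : List String × List Char) c =>
            if c = '-' then (p.1 ++ [String.ofList p.2] ++ ["-"], [])
            else (p.1, p.2 ++ [c])) (out, [])
        p.1 ++ [String.ofList p.2]
      else out ++ [w]) := by
  by_cases h : (PySem.Str.isIn "-" w && !(PySem.Str.isIn "--" w)) = true
  · rw [if_pos h, if_pos h]
    show (PySem.List.slice (PySem.Chars.splitOn w.toList ['-']) none (some (-1))).foldl _ out
        ++ [String.ofList ((PySem.List.pyGet? (PySem.Chars.splitOn w.toList ['-']) (-1)).getD [])] = _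
    rw [a_inner_eq _ (by rw [splitOn_eq_pvSplit]; exact pvSplit_ne_nil [] _) out,
        b_inner_eq w.toList out [], splitOn_eq_pvSplit]
  · rw [if_neg h, if_neg h]

theorem foldl_eq (lst : List String) (out : List String) :
    lst.foldl
      (fun out w =>
        if PySem.Str.isIn "-" w && !(PySem.Str.isIn "--" w) then
          let ss := PySem.Chars.splitOn w.toList ['-']
          let out := (PySem.List.slice ss none (some (-1))).foldl
            (fun out s => out ++ [String.ofList s] ++ ["-"]) out
          out ++ [String.ofList ((PySem.List.pyGet? ss (-1)).getD [])]
        else out ++ [w]) out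
    = lst.foldl
      (fun out w =>
        if PySem.Str.isIn "-" w && !(PySem.Str.isIn "--" w) then
          let p := w.toList.foldl
            (fun (p : List String × List Char) c =>
              if c = '-' then (p.1 ++ [String.ofList p.2] ++ ["-"], [])
              else (p.1, p.2 ++ [c])) (out, [])
          p.1 ++ [String.ofList p.2]
        else out ++ [w]) out := by
  induction lst generalizing out with
  | nil => rfl
  | cons w ws ih => simp only [List.foldl_cons]; rw [step_eq]; exact ih _

-- ===== VERDICT (by name: the statement is the Claim_ definition above) =====
theorem break_down_hyphens_spec : Claim_equal_break_down_hyphens := by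
  intro lst _
  show break_down_hyphens lst = break_down_hyphens_alt lst
  unfold break_down_hyphens break_down_hyphens_alt
  exact foldl_eq lst []
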